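-- pv_equiv track=rewrite | github.com/haraldgrove/textmanip | summary.py | columnSelect
-- ===== SOURCE A (Python) =====
-- def columnSelect(rawcol, l):
--     temp = []
--     c1 = rawcol.split(",")
--     for e in c1:
--         if "-" not in e:
--             temp.append(int(e) - 1)
--         else:
--             e1 = e.split("-")
--             try:
--                 a1 = int(e1[0])
--             except ValueError:
--                 a1 = 1
--             try:
--                 a2 = int(e1[1])
--             except ValueError:
--                 a2 = l
--             for f in range(a1, a2 + 1):
--                 temp.append(f - 1)
--     return temp
-- ===== SOURCE B (Python) =====
-- def columnSelect(rawcol, l):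
--     # Phase 1: parse every comma token into an inclusive interval (a, b).
--     intervals = []
--     for e in rawcol.split(","):
--         if "-" in e:
--             e1 = e.split("-")
--             try:
--                 a1 = int(e1[0])
--             except ValueError:
--                 a1 = 1
--             try:
--                 a2 = int(e1[1])
--             except ValueError:
--                 a2 = l
--             intervals.append((a1, a2))
--         else:
--             v = int(e)
--             intervals.append((v, v))
--     # Phase 2: flatten the intervals into 0-based indices.
--     out = []
--     for a, b in intervals:
--         out.extend(f - 1 for f in range(a, b + 1))
--     return out
-- ===== Notes on version B (the rewrite author's own statement) =====
-- stated objective: alternative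
-- what changed: B separates parsing from expansion: one pass maps each comma token to an inclusive interval (singles become (v,v)), a second pass flattens the intervals into 0-based indices, instead of A's single interleaved loop that appends singles and range elements directly.
-- outside the precondition, e.g. on columnSelect('x', 3): A raises ValueError, B raises ValueError
import Mathlib
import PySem

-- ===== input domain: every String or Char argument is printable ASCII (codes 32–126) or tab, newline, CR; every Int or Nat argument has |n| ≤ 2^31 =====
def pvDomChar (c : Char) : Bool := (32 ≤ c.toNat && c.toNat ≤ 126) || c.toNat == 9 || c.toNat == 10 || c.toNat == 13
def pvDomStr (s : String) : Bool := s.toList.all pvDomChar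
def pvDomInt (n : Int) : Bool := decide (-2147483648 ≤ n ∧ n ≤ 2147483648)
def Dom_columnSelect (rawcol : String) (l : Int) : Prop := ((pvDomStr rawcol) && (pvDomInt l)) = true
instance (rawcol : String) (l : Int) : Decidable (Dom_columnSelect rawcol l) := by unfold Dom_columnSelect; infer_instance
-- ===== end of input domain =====

-- B separates parsing (token → inclusive interval) from expansion (interval → 0-based
-- indices) into two passes instead of A's single interleaved loop; same cost.

-- ===== PORT A =====
-- A's single loop: per token, either append int(e)-1, or parse the dashed range
-- (try/except defaults = Option.getD) and append each f-1 of range(a1, a2+1).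
def columnSelect (rawcol : String) (l : Int) : List Int :=
  ((PySem.Str.split? rawcol ",").getD []).foldl
    (fun temp e =>
      if PySem.Str.isIn "-" e then
        let e1 : List String := (PySem.Str.split? e "-").getD []
        let a1 := (PySem.Int.ofStr? (e1.getD 0 "")).getD 1
        let a2 := (PySem.Int.ofStr? (e1.getD 1 "")).getD l
        temp ++ (PySem.List.pyRange a1 (a2 + 1) 1).map (fun f => f - 1)
      else
        -- int(e) raises ValueError when ofStr? = none: excluded by Pre_; getD 0 is a dummy
        temp ++ [(PySem.Int.ofStr? e).getD 0 - 1])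
    []

-- ===== PORT B =====
-- Phase 1 of Source B: map each token to an inclusive interval.
def csParseToken (l : Int) (e : String) : Int × Int :=
  if PySem.Str.isIn "-" e then
    let e1 : List String := (PySem.Str.split? e "-").getD []
    ((PySem.Int.ofStr? (e1.getD 0 "")).getD 1, (PySem.Int.ofStr? (e1.getD 1 "")).getD l)
  else
    -- int(e) raises ValueError when ofStr? = none: excluded by Pre_; getD 0 is a dummy
    let v := (PySem.Int.ofStr? e).getD 0
    (v, v)

def columnSelect_alt (rawcol : String) (l : Int) : List Int :=
  let intervals := ((PySem.Str.split? rawcol ",").getD []).map (csParseToken l)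
  -- Phase 2 of Source B: flatten the intervals into 0-based indices.
  intervals.foldl
    (fun out p => out ++ (PySem.List.pyRange p.1 (p.2 + 1) 1).map (fun f => f - 1)) []

-- ===== PRECONDITION & SPEC =====
-- Pre_ excludes exactly the inputs where Python A raises ValueError: a comma token
-- without '-' that int() cannot parse (the dashed branch never raises).
def Pre_columnSelect (rawcol : String) (l : Int) : Prop :=
  ∀ e ∈ (PySem.Str.split? rawcol ",").getD [],
    PySem.Str.isIn "-" e = true ∨ (PySem.Int.ofStr? e).isSome = true
instance (rawcol : String) (l : Int) : Decidable (Pre_columnSelect rawcol l) := by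
  unfold Pre_columnSelect; infer_instance
def pvWitness_columnSelect : String × Int := ("2,5-7,3-", 9)

def Spec_columnSelect (rawcol : String) (l : Int) (out : List Int) : Prop := out = columnSelect_alt rawcol l
instance (rawcol : String) (l : Int) (out : List Int) : Decidable (Spec_columnSelect rawcol l out) := by unfold Spec_columnSelect; infer_instance

-- ===== CLAIM (what is proved, stated in full; the proofs are below) =====
def Claim_equal_columnSelect : Prop := ∀ (rawcol : String) (l : Int), Dom_columnSelect rawcol l → Pre_columnSelect rawcol l → Spec_columnSelect rawcol l (columnSelect rawcol l)

-- ===== LEMMAS AND PROOFS =====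

-- A's per-token appended chunk equals the expansion of B's parsed interval.
theorem csChunk_eq (l : Int) (e : String) :
    (if PySem.Str.isIn "-" e then
       let e1 : List String := (PySem.Str.split? e "-").getD []
       let a1 := (PySem.Int.ofStr? (e1.getD 0 "")).getD 1
       let a2 := (PySem.Int.ofStr? (e1.getD 1 "")).getD l
       (PySem.List.pyRange a1 (a2 + 1) 1).map (fun f => f - 1)
     else [(PySem.Int.ofStr? e).getD 0 - 1]) =
    (PySem.List.pyRange (csParseToken l e).1 ((csParseToken l e).2 + 1) 1).map (fun f => f - 1) := by
  unfold csParseToken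
  split_ifs with h
  · rfl
  · rw [PySem.List.pyRange_one_singleton]
    rfl

theorem columnSelect_spec_aux (l : Int) (ts : List String) (acc : List Int) :
    ts.foldl
      (fun temp e =>
        if PySem.Str.isIn "-" e then
          let e1 : List String := (PySem.Str.split? e "-").getD []
          let a1 := (PySem.Int.ofStr? (e1.getD 0 "")).getD 1
          let a2 := (PySem.Int.ofStr? (e1.getD 1 "")).getD l
          temp ++ (PySem.List.pyRange a1 (a2 + 1) 1).map (fun f => f - 1)
        else temp ++ [(PySem.Int.ofStr? e).getD 0 - 1]) acc =
    (ts.map (csParseToken l)).foldl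
      (fun out p => out ++ (PySem.List.pyRange p.1 (p.2 + 1) 1).map (fun f => f - 1)) acc := by
  induction ts generalizing acc with
  | nil => rfl
  | cons e ts ih =>
    simp only [List.foldl_cons, List.map_cons]
    rw [← ih]
    congr 1
    by_cases h : PySem.Str.isIn "-" e
    · simp only [h, if_true]
      have := csChunk_eq l e
      rw [if_pos h] at this
      simpa [List.getD] using this
    · simp only [h]
      have := csChunk_eq l e
      rw [if_neg h] at this
      simpa [List.getD] using this

-- ===== VERDICT (by name: the statement is the Claim_ definition above) =====
theorem columnSelect_spec : Claim_equal_columnSelect := by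
  intro rawcol l _ _
  unfold Spec_columnSelect columnSelect columnSelect_alt
  exact columnSelect_spec_aux l _ []
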